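-- pv_equiv track=rewrite | github.com/SouraDutta/IITJ_AI_MTech_NLP_Projects | Relation Pred/test.py | is_normal_triple
-- ===== SOURCE A (Python) =====
-- def is_normal_triple(triples):
--     """
--     normal triples means triples are not over lap in entity.
--     example [[e1,e2,r1], [e3,e4,r2]]
--     :param triples
--     :param is_relation_first
--     :return:
--
--     >>> is_normal_triple([1,2,3, 4,5,0])
--     True
--     >>> is_normal_triple([1,2,3, 4,5,3])
--     True
--     >>> is_normal_triple([1,2,3, 2,5,0])
--     False
--     >>> is_normal_triple([1,2,3, 1,2,0])
--     False
--     """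
--     entities = set()
--     for e in triples:
--         entities.add(e[0])
--         entities.add(e[1])
--     if len(entities) != 2 * len(triples):
--         return False
--     return True
-- ===== SOURCE B (Python) =====
-- def is_normal_triple(triples):
--     ents = []
--     for e in triples:
--         ents.append(e[0])
--         ents.append(e[1])
--     ents.sort()
--     return all(a != b for a, b in zip(ents, ents[1:]))
-- ===== Notes on version B (the rewrite author's own statement) =====
-- stated objective: alternative
-- what changed: Replaces the hash-set distinct-count (len(set) == 2*len) with flattening all entities into one list, sorting it, and scanning adjacent pairs for a duplicate.
import Mathlib
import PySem

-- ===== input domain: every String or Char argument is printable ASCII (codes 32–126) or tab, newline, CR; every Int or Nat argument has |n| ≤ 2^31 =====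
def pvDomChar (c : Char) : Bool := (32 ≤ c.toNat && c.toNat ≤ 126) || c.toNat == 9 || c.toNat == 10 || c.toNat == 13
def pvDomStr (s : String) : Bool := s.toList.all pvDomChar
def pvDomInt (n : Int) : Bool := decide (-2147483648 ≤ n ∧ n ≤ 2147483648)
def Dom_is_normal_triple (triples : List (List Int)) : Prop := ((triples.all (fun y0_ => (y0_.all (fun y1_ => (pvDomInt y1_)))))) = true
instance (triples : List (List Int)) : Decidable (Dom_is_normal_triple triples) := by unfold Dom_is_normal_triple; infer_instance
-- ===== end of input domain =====

-- B replaces A's hash-set distinct-count with sort-then-adjacent-scan duplicate detection (alternative algorithm, not claimed faster).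

-- ===== PORT A =====
-- entities = set(); for e in triples: entities.add(e[0]); entities.add(e[1])
def pvAStep (acc : Option (PySem.Set Int)) (e : List Int) : Option (PySem.Set Int) :=
  acc.bind fun s =>
    (PySem.List.pyGet? e 0).bind fun a =>
      (PySem.List.pyGet? e 1).map fun b =>
        PySem.Set.add (PySem.Set.add s a) b

def is_normal_triple (triples : List (List Int)) : Bool :=
  match triples.foldl pvAStep (some PySem.Set.empty) with
  | none => false   -- IndexError: excluded by Pre_
  | some entities =>
    if PySem.Set.len entities ≠ 2 * PySem.List.len triples then false else true

-- ===== PORT B =====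
-- ents = []; for e in triples: ents.append(e[0]); ents.append(e[1])
def pvBStep (acc : Option (List Int)) (e : List Int) : Option (List Int) :=
  acc.bind fun l =>
    (PySem.List.pyGet? e 0).bind fun a =>
      (PySem.List.pyGet? e 1).map fun b =>
        (l ++ [a]) ++ [b]

def is_normal_triple_alt (triples : List (List Int)) : Bool :=
  match triples.foldl pvBStep (some []) with
  | none => false   -- IndexError: excluded by Pre_
  | some ents =>
    let s := PySem.List.sorted ents (fun x => x) false
    (s.zip (PySem.List.slice s (some 1) none)).all fun p => !(p.1 == p.2)

-- ===== PRECONDITION & SPEC =====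
-- Pre_ excludes exactly the inputs where A raises IndexError: a triple with fewer than 2 elements.
def Pre_is_normal_triple (triples : List (List Int)) : Prop :=
  ∀ e ∈ triples, 2 ≤ e.length
instance (triples : List (List Int)) : Decidable (Pre_is_normal_triple triples) := by
  unfold Pre_is_normal_triple; infer_instance

def pvWitness_is_normal_triple : List (List Int) := [[1, 2, 3], [4, 5, 0]]

def Spec_is_normal_triple (triples : List (List Int)) (out : Bool) : Prop := out = is_normal_triple_alt triples
instance (triples : List (List Int)) (out : Bool) : Decidable (Spec_is_normal_triple triples out) := by unfold Spec_is_normal_triple; infer_instance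

-- ===== CLAIM (what is proved, stated in full; the proofs are below) =====
def Claim_equal_is_normal_triple : Prop := ∀ (triples : List (List Int)), Dom_is_normal_triple triples → Pre_is_normal_triple triples → Spec_is_normal_triple triples (is_normal_triple triples)

-- ===== LEMMAS AND PROOFS =====

-- the flattened entity list [e1[0], e1[1], e2[0], e2[1], …]
def pvFlat : List (List Int) → List Int
  | [] => []
  | e :: t => e.getD 0 0 :: e.getD 1 0 :: pvFlat t

lemma pvFlat_length (triples : List (List Int)) :
    (pvFlat triples).length = 2 * triples.length := by
  induction triples with
  | nil => rfl
  | cons e t ih => simp [pvFlat, ih]; omega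

lemma pvGets (e : List Int) (he : 2 ≤ e.length) :
    PySem.List.pyGet? e 0 = some (e.getD 0 0) ∧ PySem.List.pyGet? e 1 = some (e.getD 1 0) := by
  match e, he with
  | a :: b :: t, _ =>
    constructor
    · rw [PySem.List.pyGet?_zero_cons]; rfl
    · rw [show (1 : Int) = ((1 : Nat) : Int) from rfl, PySem.List.pyGet?_natCast]; rfl

lemma pvAfold (triples : List (List Int)) (h : ∀ e ∈ triples, 2 ≤ e.length) :
    ∀ s : PySem.Set Int,
      triples.foldl pvAStep (some s) = some (PySem.Set.update s (pvFlat triples)) := by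
  induction triples with
  | nil => intro s; simp [PySem.Set.update, pvFlat]
  | cons e t ih =>
    intro s
    obtain ⟨h0, h1⟩ := pvGets e (h e (by simp))
    have := ih (fun e' he' => h e' (by simp [he']))
    simp [List.foldl_cons, pvAStep, h0, h1, this, pvFlat, PySem.Set.update]

lemma pvBfold (triples : List (List Int)) (h : ∀ e ∈ triples, 2 ≤ e.length) :
    ∀ l : List Int,
      triples.foldl pvBStep (some l) = some (l ++ pvFlat triples) := by
  induction triples with
  | nil => intro l; simp [pvFlat]
  | cons e t ih =>
    intro l
    obtain ⟨h0, h1⟩ := pvGets e (h e (by simp))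
    have := ih (fun e' he' => h e' (by simp [he']))
    simp [List.foldl_cons, pvBStep, h0, h1, this, pvFlat]

-- distinct count equals length iff no duplicates
lemma pvOfList_length_iff (l : List Int) :
    (PySem.Set.ofList l).length = l.length ↔ l.Nodup := by
  constructor
  · intro h
    have hperm : (PySem.Set.ofList l).Perm l.dedup := by
      apply (List.perm_ext_iff_of_nodup (PySem.Set.nodup_ofList l) l.nodup_dedup).mpr
      intro x; simp [PySem.Set.mem_ofList]
    have hlen : l.dedup.length = l.length := by
      rw [← hperm.length_eq, h]
    have heq : l.dedup = l := (l.dedup_sublist).eq_of_length hlen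
    rw [← heq]; exact l.nodup_dedup
  · intro h
    rw [PySem.Set.ofList_eq_self_of_nodup l h]

-- adjacent-pair scan of a ≤-ordered list detects exactly the duplicates
lemma pvAdj (s : List Int) (hle : s.Pairwise (fun a b => a ≤ b)) :
    ((s.zip s.tail).all (fun p => !(p.1 == p.2))) = true ↔ s.Nodup := by
  induction s with
  | nil => simp
  | cons a t ih =>
    cases t with
    | nil => simp
    | cons b t' =>
      rw [List.pairwise_cons] at hle
      have hih := ih hle.2
      simp only [List.tail_cons, List.zip_cons_cons, List.all_cons, Bool.and_eq_true]
      constructor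
      · rintro ⟨hab, hrest⟩
        have hab' : a ≠ b := by simpa using hab
        have hnd := hih.mp hrest
        rw [List.nodup_cons]
        refine ⟨?_, hnd⟩
        intro hmem
        rcases List.mem_cons.mp hmem with rfl | hmem'
        · exact hab' rfl
        · have hb := (List.pairwise_cons.mp hle.2).1 a hmem'
          exact hab' (le_antisymm (hle.1 b (by simp)) hb)
      · intro hnd
        rw [List.nodup_cons] at hnd
        refine ⟨?_, hih.mpr hnd.2⟩
        have hab : a ≠ b := fun h => hnd.1 (h ▸ List.mem_cons_self)
        simpa using hab

lemma pvZipAll_iff (l : List Int) :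
    ((PySem.List.sorted l (fun x => x) false).zip
      ((PySem.List.sorted l (fun x => x) false).tail)).all (fun p => !(p.1 == p.2)) = true
    ↔ l.Nodup := by
  rw [pvAdj _ (PySem.List.sorted_pairwise l (fun x => x))]
  exact (PySem.List.sorted_perm l (fun x => x) false).nodup_iff

-- ===== VERDICT (by name: the statement is the Claim_ definition above) =====
theorem is_normal_triple_spec : Claim_equal_is_normal_triple := by
  intro triples _ hpre
  unfold Spec_is_normal_triple is_normal_triple is_normal_triple_alt
  rw [pvAfold triples hpre PySem.Set.empty, pvBfold triples hpre []]
  simp only [List.nil_append]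
  have hupd : PySem.Set.update PySem.Set.empty (pvFlat triples) = PySem.Set.ofList (pvFlat triples) := rfl
  rw [hupd, PySem.List.slice_from_one]
  have hA : (if PySem.Set.len (PySem.Set.ofList (pvFlat triples)) ≠ 2 * PySem.List.len triples then false else true)
      = decide ((PySem.Set.ofList (pvFlat triples)).length = (pvFlat triples).length) := by
    simp [PySem.Set.len, PySem.List.len, pvFlat_length]
    by_cases h : ((PySem.Set.ofList (pvFlat triples)).length : Int) = 2 * (triples.length : Int)
    · simp [h]
      omega
    · simp [h]
      omega
  rw [hA]
  have hB : ((PySem.List.sorted (pvFlat triples) (fun x => x) false).zip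
      ((PySem.List.sorted (pvFlat triples) (fun x => x) false).tail)).all (fun p => !(p.1 == p.2))
      = decide ((pvFlat triples).Nodup) := by
    by_cases hn : (pvFlat triples).Nodup
    · simp only [hn, decide_true]
      exact (pvZipAll_iff _).mpr hn
    · simp only [hn, decide_false]
      rw [Bool.eq_false_iff]
      intro h
      exact hn ((pvZipAll_iff _).mp h)
  rw [hB, decide_eq_decide]
  exact pvOfList_length_iff _
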